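-- pv_equiv track=rewrite | github.com/MathsStan/Project-Euler-Solutions | 5project.py | remove_divisors
-- ===== SOURCE A (Python) =====
-- def remove_divisors(divisor_list):
--     for index, divisor in enumerate(divisor_list):
--         if any([x % divisor == 0 for x in divisor_list[index+1:]]):
--             divisor_list.remove(divisor)
--             break
--     else:
--         return divisor_list
--     return remove_divisors(divisor_list)
-- ===== SOURCE B (Python) =====
-- def remove_divisors(divisor_list):
--     # Single left-to-right pass: keep an element iff no later element of the
--     # ORIGINAL list is a multiple of it (no mutation; A mutates its argument,
--     # equivalence is about the return value).
--     out = []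
--     rest = divisor_list
--     while rest:
--         d, rest = rest[0], rest[1:]
--         if all(x % d != 0 for x in rest):
--             out.append(d)
--     return out
-- ===== Notes on version B (the rewrite author's own statement) =====
-- stated objective: faster
-- what changed: A repeatedly rescans and mutates the list, removing the first element that divides a later one and recursing until a fixed point; B is a single non-mutating pass that keeps an element iff no later element of the original list is a multiple of it (one pass suffices because the rightmost multiple of a doomed element is never removed).
import Mathlib
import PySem

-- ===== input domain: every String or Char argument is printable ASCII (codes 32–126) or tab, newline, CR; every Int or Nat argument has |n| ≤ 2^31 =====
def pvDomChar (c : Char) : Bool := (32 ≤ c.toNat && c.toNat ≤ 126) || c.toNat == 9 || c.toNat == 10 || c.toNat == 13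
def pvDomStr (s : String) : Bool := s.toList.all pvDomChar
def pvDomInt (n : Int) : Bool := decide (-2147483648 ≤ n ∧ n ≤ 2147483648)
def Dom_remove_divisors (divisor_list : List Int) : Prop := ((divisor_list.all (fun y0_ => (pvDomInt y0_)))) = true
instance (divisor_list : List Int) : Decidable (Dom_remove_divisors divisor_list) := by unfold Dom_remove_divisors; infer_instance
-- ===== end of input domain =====

-- B replaces A's remove-and-recurse fixpoint by ONE non-mutating pass (keep an element iff
-- no later element of the original list is a multiple of it); equivalence is about the
-- RETURN value only — A mutates its argument in place, B does not.

-- ===== PORT A =====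
-- A's for/else loop: the first divisor (scanning left to right) that divides a later element.
def rdTrigger : List Int → Option Int
  | [] => none
  | d :: rest => if rest.any (fun x => PySem.Int.mod x d == 0) then some d else rdTrigger rest

-- (termination helper for the port, cited by decreasing_by)
theorem rdTrigger_mem {l : List Int} {d : Int} (h : rdTrigger l = some d) : d ∈ l := by
  induction l with
  | nil => simp [rdTrigger] at h
  | cons a t ih =>
    by_cases ha : t.any (fun x => PySem.Int.mod x a == 0)
    · simp [rdTrigger, ha] at h; simp [h]
    · simp [rdTrigger, ha] at h; exact List.mem_cons_of_mem _ (ih h)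

def remove_divisors (divisor_list : List Int) : List Int :=
  match htrig : rdTrigger divisor_list with
  | none => divisor_list
  | some d =>
    match hrem : PySem.List.remove? divisor_list d with
    | some l' => remove_divisors l'
    | none => divisor_list   -- unreachable: the triggering divisor is an element of the list
termination_by divisor_list.length
decreasing_by
  have hd : d ∈ divisor_list := rdTrigger_mem htrig
  have : l' = divisor_list.erase d := by
    rw [PySem.List.remove?_eq_some_erase divisor_list d hd] at hrem
    exact (Option.some.inj hrem).symm
  subst this
  have := List.length_erase_of_mem hd
  have hne : divisor_list ≠ [] := by intro h; subst h; simp at hd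
  have : 0 < divisor_list.length := List.length_pos_iff.mpr hne
  omega

-- ===== PORT B =====
-- Source B's while loop: peel the head d off rest, append d to out iff no element of rest is a multiple of d.
def rdLoop : List Int → List Int → List Int
  | [], out => out
  | d :: rest, out => rdLoop rest (if rest.all (fun x => PySem.Int.mod x d != 0) then out ++ [d] else out)

def remove_divisors_alt (divisor_list : List Int) : List Int := rdLoop divisor_list []

-- ===== PRECONDITION & SPEC =====
-- Pre_ excludes exactly the inputs on which Python A raises ZeroDivisionError (x % 0):
-- a 0 at any non-last position (B raises there too; a 0 as last element is fine and admitted).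
def Pre_remove_divisors (divisor_list : List Int) : Prop := (0 : Int) ∉ divisor_list.dropLast
instance (divisor_list : List Int) : Decidable (Pre_remove_divisors divisor_list) := by unfold Pre_remove_divisors; infer_instance

def pvWitness_remove_divisors : List Int := ([2, 4, 5] : List Int)

def Spec_remove_divisors (divisor_list : List Int) (out : List Int) : Prop := out = remove_divisors_alt divisor_list
instance (divisor_list : List Int) (out : List Int) : Decidable (Spec_remove_divisors divisor_list out) := by unfold Spec_remove_divisors; infer_instance

-- ===== CLAIM (what is proved, stated in full; the proofs are below) =====
def Claim_equal_remove_divisors : Prop := ∀ (divisor_list : List Int), Dom_remove_divisors divisor_list → Pre_remove_divisors divisor_list → Spec_remove_divisors divisor_list (remove_divisors divisor_list)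

-- ===== LEMMAS AND PROOFS =====

-- the common specification: keep an element iff no later element is a multiple of it
def rdSurv : List Int → List Int
  | [] => []
  | d :: t => if t.any (fun x => PySem.Int.mod x d == 0) then rdSurv t else d :: rdSurv t

-- B computes rdSurv (accumulator form of the loop)
theorem rdLoop_eq (l : List Int) : ∀ out, rdLoop l out = out ++ rdSurv l := by
  induction l with
  | nil => intro out; simp [rdLoop, rdSurv]
  | cons d t ih =>
    intro out
    by_cases h : t.any (fun x => PySem.Int.mod x d == 0)
    · have hall : t.all (fun x => PySem.Int.mod x d != 0) = false := by
        rcases List.any_eq_true.mp h with ⟨x, hx, hpx⟩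
        refine Bool.eq_false_iff.mpr ?_
        intro hc
        have hx' := List.all_eq_true.mp hc x hx
        have h0 : PySem.Int.mod x d = 0 := by simpa using hpx
        simp [h0] at hx'
      simp [rdLoop, rdSurv, h, hall, ih]
    · have hall : t.all (fun x => PySem.Int.mod x d != 0) = true := by
        simp only [List.all_eq_true]
        intro x hx
        have : ¬ (PySem.Int.mod x d == 0) = true := fun hc => h (List.any_eq_true.mpr ⟨x, hx, hc⟩)
        simpa [bne] using this
      simp [rdLoop, rdSurv, h, hall, ih]

theorem rdTrigger_none (l : List Int) (h : rdTrigger l = none) : rdSurv l = l := by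
  induction l with
  | nil => simp [rdSurv]
  | cons a t ih =>
    by_cases ha : t.any (fun x => PySem.Int.mod x a == 0)
    · simp [rdTrigger, ha] at h
    · simp [rdTrigger, ha] at h
      simp [rdSurv, ha, ih h]

theorem rdTrigger_witness {l : List Int} {d : Int} (h : rdTrigger l = some d) :
    ∃ x ∈ l, (PySem.Int.mod x d == 0) = true := by
  induction l with
  | nil => simp [rdTrigger] at h
  | cons a t ih =>
    by_cases ha : t.any (fun x => PySem.Int.mod x a == 0)
    · simp [rdTrigger, ha] at h
      subst h
      rcases List.any_eq_true.mp ha with ⟨x, hx, hpx⟩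
      exact ⟨x, List.mem_cons_of_mem _ hx, hpx⟩
    · simp [rdTrigger, ha] at h
      rcases ih h with ⟨x, hx, hpx⟩
      exact ⟨x, List.mem_cons_of_mem _ hx, hpx⟩

-- removing the first triggering element does not change the survivor list
theorem rdSurv_erase {l : List Int} {d : Int} (h : rdTrigger l = some d) :
    rdSurv l = rdSurv (l.erase d) := by
  induction l with
  | nil => simp [rdTrigger] at h
  | cons a t ih =>
    by_cases ha : t.any (fun x => PySem.Int.mod x a == 0)
    · simp [rdTrigger, ha] at h
      subst h
      simp [rdSurv, ha, List.erase_cons_head]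
    · simp [rdTrigger, ha] at h
      have hne : a ≠ d := by
        intro he
        subst he
        rcases rdTrigger_witness h with ⟨x, hx, hpx⟩
        exact ha (List.any_eq_true.mpr ⟨x, hx, hpx⟩)
      have herase : (a :: t).erase d = a :: t.erase d := by
        rw [List.erase_cons_tail]
        simpa using hne
      have ha' : (t.erase d).any (fun x => PySem.Int.mod x a == 0) = false := by
        by_contra hc
        rcases List.any_eq_true.mp (Bool.of_not_eq_false hc) with ⟨x, hx, hpx⟩
        exact ha (List.any_eq_true.mpr ⟨x, List.erase_subset hx, hpx⟩)
      rw [herase]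
      simp [rdSurv, ha, ha', ih h]

theorem remove_divisors_eq_surv (l : List Int) : remove_divisors l = rdSurv l := by
  induction l using remove_divisors.induct with
  | case1 l htrig =>
    rw [remove_divisors]
    split
    · exact (rdTrigger_none l htrig).symm
    · next d heq => rw [htrig] at heq; cases heq
  | case2 l d htrig l' hrem ih =>
    rw [remove_divisors]
    split
    · next heq => rw [htrig] at heq; cases heq
    next d' heq =>
    rw [htrig] at heq
    cases heq
    split
    · next l'' heq2 =>
      rw [hrem] at heq2
      cases heq2
      have hd : d ∈ l := rdTrigger_mem htrig
      have hl' : l' = l.erase d := by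
        rw [PySem.List.remove?_eq_some_erase l d hd] at hrem
        exact (Option.some.inj hrem).symm
      rw [ih, hl', ← rdSurv_erase htrig]
    · next heq2 => rw [hrem] at heq2; cases heq2
  | case3 l d htrig hrem =>
    exfalso
    have hd : d ∈ l := rdTrigger_mem htrig
    rw [PySem.List.remove?_eq_some_erase l d hd] at hrem
    simp at hrem

-- ===== VERDICT (by name: the statement is the Claim_ definition above) =====
theorem remove_divisors_spec : Claim_equal_remove_divisors := by
  intro l _ _
  unfold Spec_remove_divisors remove_divisors_alt
  rw [rdLoop_eq l [], List.nil_append, remove_divisors_eq_surv]
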